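-- pv_equiv track=rewrite | github.com/saitamashigoto/algo | cards.py | solve
-- ===== SOURCE A (Python) =====
-- def solve(c):
--     p = 10**9 + 7
--     c_dict = {}
--     for i in c:
--         v = c_dict.setdefault(i, 0)
--         c_dict[i] = v + 1
--     sorted_numbers = list(c_dict.keys())
--     sorted_numbers.sort()
--     res = 1
--     picked_up = 0
--     pickable = pickableCards(c_dict, sorted_numbers, picked_up)
--     while (pickable-picked_up) > 0 and picked_up < len(c):
--         res = (res * (pickable-picked_up)) % p
--         picked_up += 1
--         pickable = pickableCards(c_dict, sorted_numbers, picked_up)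
--     if picked_up < len(c):
--         return 0
--     return res
--
-- def pickableCards(c_cards, sorted_cards, picked_up):
--     res = 0
--     for i in sorted_cards:
--         if i > picked_up:
--             break
--         res += c_cards[i]
--     return res
-- ===== SOURCE B (Python) =====
-- def solve(c):
--     # One sort + a single pointer sweep instead of rescanning the counter dict each step.
--     p = 10**9 + 7
--     s = sorted(c)
--     n = len(c)
--     res = 1
--     j = 0
--     for k in range(n):
--         while j < n and s[j] <= k:
--             j += 1
--         f = j - k
--         if f <= 0:
--             return 0
--         res = res * f % p
--     return res
-- ===== Notes on version B (the rewrite author's own statement) =====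
-- stated objective: faster
-- what changed: A rebuilds a value-count dict and rescans its sorted keys from scratch at every pick step (pickableCards inside the while loop); B sorts the cards once and sweeps a single monotone pointer over the sorted list, so the cumulative count of pickable cards is maintained incrementally in one pass.
import Mathlib
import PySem

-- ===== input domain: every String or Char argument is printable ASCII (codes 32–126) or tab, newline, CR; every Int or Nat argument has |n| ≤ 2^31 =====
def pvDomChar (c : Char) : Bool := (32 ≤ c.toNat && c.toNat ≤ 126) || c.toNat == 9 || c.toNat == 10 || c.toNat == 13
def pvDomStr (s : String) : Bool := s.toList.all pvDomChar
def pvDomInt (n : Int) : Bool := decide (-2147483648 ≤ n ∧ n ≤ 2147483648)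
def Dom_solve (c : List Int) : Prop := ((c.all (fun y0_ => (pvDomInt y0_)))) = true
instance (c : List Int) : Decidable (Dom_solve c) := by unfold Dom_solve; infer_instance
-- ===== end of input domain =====

-- B replaces A's per-step rescan of the counter dict by one sort of the cards and a single
-- monotone pointer sweep (objective: faster, asymptotic).

-- ===== PORT A =====
-- the 'for i in sorted_cards: if i > picked_up: break; res += c_cards[i]' loop
-- (keys come from the dict itself, so the c_cards[i] lookup always succeeds; getD 0 is exact here)
def pickLoop (cc : PySem.Dict Int Int) (picked : Int) : List Int → Int → Int
  | [], res => res
  | i :: t, res => if i > picked then res else pickLoop cc picked t (res + cc.getD i 0)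

def pickableCards (c_cards : PySem.Dict Int Int) (sorted_cards : List Int) (picked_up : Int) : Int :=
  pickLoop c_cards picked_up sorted_cards 0

-- the while loop; fuel = len(c)+1 bounds its ≤ len(c)+1 iterations (picked_up grows, picked_up < len(c) required)
def solveLoop (cd : PySem.Dict Int Int) (sn : List Int) (n p : Int) (fuel : Nat) (picked res : Int) : Int :=
  -- pickable = pickableCards(...) recomputed at each loop head, named inline
  if pickableCards cd sn picked - picked > 0 ∧ picked < n then
    match fuel with
    | 0 => 0  -- unreachable with fuel = n+1
    | f+1 => solveLoop cd sn n p f (picked + 1) (PySem.Int.mod (res * (pickableCards cd sn picked - picked)) p)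
  else if picked < n then 0 else res

def solve (c : List Int) : Int :=
  let p : Int := 10 ^ 9 + 7
  let cd := c.foldl (fun d i =>
    let v := (d.get? i).getD 0          -- v = c_dict.setdefault(i, 0)
    (d.setdefault i 0).insert i (v + 1) -- c_dict[i] = v + 1
    ) PySem.Dict.empty
  let sorted_numbers := PySem.List.sorted cd.keys (fun x => x) false
  solveLoop cd sorted_numbers c.length p (c.length + 1) 0 1

-- ===== PORT B =====
-- while j < n and s[j] <= k: j += 1
def altAdvance (s : List Int) (k : Int) (j : Nat) : Nat :=
  if h : j < s.length then
    if s[j] ≤ k then altAdvance s k (j + 1) else j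
  else j
termination_by s.length - j

-- for k in range(n): advance j; f = j - k; if f <= 0: return 0; res = res * f % p
def altLoop (s : List Int) (p : Int) : List Int → Nat → Int → Int
  | [], _, res => res
  | k :: ks, j, res =>
    let j' := altAdvance s k j
    let f : Int := (j' : Int) - k
    if f ≤ 0 then 0 else altLoop s p ks j' (PySem.Int.mod (res * f) p)

def solve_alt (c : List Int) : Int :=
  let p : Int := 10 ^ 9 + 7
  let s := PySem.List.sorted c (fun x => x) false
  altLoop s p (PySem.List.pyRange 0 c.length 1) 0 1

-- ===== PRECONDITION & SPEC =====
def Spec_solve (c : List Int) (out : Int) : Prop := out = solve_alt c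
instance (c : List Int) (out : Int) : Decidable (Spec_solve c out) := by unfold Spec_solve; infer_instance

-- ===== CLAIM (what is proved, stated in full; the proofs are below) =====
def Claim_equal_solve : Prop := ∀ (c : List Int), Dom_solve c → Spec_solve c (solve c)

-- ===== LEMMAS AND PROOFS =====

-- number of cards with value ≤ k
def cnt (c : List Int) (k : Int) : Int := (c.countP (fun x => decide (x ≤ k)) : Int)

-- the common abstract loop both programs compute: m steps remain, picked = len c - m
def refLoop (c : List Int) (p : Int) : Nat → Int → Int → Int
  | 0, _, res => res
  | m + 1, picked, res =>
    let f := cnt c picked - picked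
    if f ≤ 0 then 0 else refLoop c p m (picked + 1) (PySem.Int.mod (res * f) p)

theorem pickLoop_eq (cc : PySem.Dict Int Int) (picked : Int) (L : List Int)
    (hL : L.Pairwise (· ≤ ·)) (res : Int) :
    pickLoop cc picked L res
      = res + ((L.filter (fun i => decide (i ≤ picked))).map (fun i => cc.getD i 0)).sum := by
  induction L generalizing res with
  | nil => simp [pickLoop]
  | cons i t ih =>
    rw [List.pairwise_cons] at hL
    by_cases h : i > picked
    · have ht : t.filter (fun x => decide (x ≤ picked)) = [] := by
        rw [List.filter_eq_nil_iff]
        intro x hx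
        have := hL.1 x hx
        simp; omega
      simp [pickLoop, h, ht, show ¬ (i ≤ picked) by omega]
    · have hi : i ≤ picked := by omega
      simp only [pickLoop, if_neg h]
      rw [ih hL.2]
      simp [hi]
      ring

theorem ind_sum (M : List Int) (hM : M.Nodup) (x : Int) :
    (M.map (fun i => if i = x then (1 : Int) else 0)).sum = if x ∈ M then (1 : Int) else 0 := by
  induction M with
  | nil => simp
  | cons a M' ih =>
    rw [List.nodup_cons] at hM
    by_cases h : a = x
    · subst h
      simp [ih hM.2, hM.1]
    · simp [h, ih hM.2, Ne.symm h]

theorem sum_count (L : List Int) (hL : L.Nodup) (k : Int) (c : List Int)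
    (hc : ∀ x ∈ c, x ∈ L) :
    ((L.filter (fun i => decide (i ≤ k))).map (fun i => ((c.count i : Int)))).sum = cnt c k := by
  induction c with
  | nil => simp [cnt]
  | cons x c' ih =>
    have hsplit : ∀ M : List Int,
        (M.map (fun i => (((x :: c').count i : Int)))).sum
          = (M.map (fun i => ((c'.count i : Int)))).sum
            + (M.map (fun i => if i = x then (1 : Int) else 0)).sum := by
      intro M
      induction M with
      | nil => simp
      | cons a t iht =>
        simp only [List.map_cons, List.sum_cons, List.count_cons]
        push_cast
        have hswap : (fun i => if x = i then (1 : Int) else 0)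
            = (fun i => if i = x then (1 : Int) else 0) :=
          funext fun i => if_congr eq_comm rfl rfl
        by_cases hax : a = x
        · simp [hax, hswap]
          ring
        · simp [hax, Ne.symm hax, hswap]
          ring
    rw [hsplit, ih (fun y hy => hc y (List.mem_cons_of_mem _ hy)),
        ind_sum _ (hL.filter _) x]
    have hx : x ∈ L := hc x (List.mem_cons_self ..)
    have hmem : x ∈ L.filter (fun i => decide (i ≤ k)) ↔ x ≤ k := by
      simp [List.mem_filter, hx]
    by_cases hxk : x ≤ k
    · rw [if_pos (hmem.mpr hxk)]
      simp [cnt, hxk]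
    · rw [if_neg (fun hmm => hxk (hmem.mp hmm))]
      simp [cnt, hxk]

theorem fold_eq_counter (c : List Int) :
    c.foldl (fun d i =>
      (d.setdefault i 0).insert i ((d.get? i).getD 0 + 1)) PySem.Dict.empty
      = PySem.Dict.counter c := by
  have hstep : (fun (d : PySem.Dict Int Int) (i : Int) =>
      (d.setdefault i 0).insert i ((d.get? i).getD 0 + 1))
      = fun (d : PySem.Dict Int Int) (i : Int) => d.insert i (d.getD i 0 + 1) := by
    funext d i
    show (d.setdefault i 0).insert i ((d.get? i).getD 0 + 1) = d.insert i (d.getD i 0 + 1)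
    by_cases h : d.contains i = true
    · rw [PySem.Dict.setdefault_of_contains d 0 h, PySem.Dict.getD_eq_get?_getD]
    · rw [PySem.Dict.setdefault_of_not_contains d 0 (by simpa using h),
        PySem.Dict.insert_insert_self, PySem.Dict.getD_eq_get?_getD]
  rw [hstep, PySem.Dict.foldl_insert_getD_add_one_eq_counter]

theorem pickable_eq (c : List Int) (picked : Int) :
    pickableCards (PySem.Dict.counter c)
      (PySem.List.sorted (PySem.Dict.counter c).keys (fun x => x) false) picked = cnt c picked := by
  have hk : (PySem.Dict.counter c).keys = PySem.Set.ofList c := PySem.Dict.keys_counter c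
  have hlt : (PySem.List.sorted (PySem.Dict.counter c).keys (fun x => x) false).Pairwise (· < ·) := by
    rw [hk]; exact PySem.List.sorted_ofList_pairwise_lt c
  have hle : (PySem.List.sorted (PySem.Dict.counter c).keys (fun x => x) false).Pairwise (· ≤ ·) :=
    hlt.imp (fun h => le_of_lt h)
  have hnd : (PySem.List.sorted (PySem.Dict.counter c).keys (fun x => x) false).Nodup :=
    hlt.imp (fun h => ne_of_lt h)
  have hmem : ∀ x ∈ c, x ∈ PySem.List.sorted (PySem.Dict.counter c).keys (fun x => x) false := by
    intro x hx
    rw [PySem.List.mem_sorted, hk]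
    exact (PySem.Set.mem_ofList c x).mpr hx
  unfold pickableCards
  rw [pickLoop_eq _ _ _ hle, zero_add]
  rw [show ((PySem.List.sorted (PySem.Dict.counter c).keys (fun x => x) false).filter
        (fun i => decide (i ≤ picked))).map (fun i => (PySem.Dict.counter c).getD i 0)
      = ((PySem.List.sorted (PySem.Dict.counter c).keys (fun x => x) false).filter
        (fun i => decide (i ≤ picked))).map (fun i => ((c.count i : Int)))
    from List.map_congr_left (fun i _ => PySem.Dict.getD_counter c i)]
  exact sum_count _ hnd picked c hmem

theorem solveLoop_eq (c : List Int) (cd : PySem.Dict Int Int) (sn : List Int) (p : Int)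
    (hpk : ∀ t, pickableCards cd sn t = cnt c t) :
    ∀ (m fuel : Nat) (res : Int), m ≤ fuel → m ≤ c.length →
      solveLoop cd sn c.length p fuel ((c.length : Int) - m) res = refLoop c p m ((c.length : Int) - m) res := by
  intro m
  induction m with
  | zero =>
    intro fuel res _ _
    rw [solveLoop.eq_def]
    have h1 : ¬ ((c.length : Int) - ((0 : Nat) : Int) < (c.length : Int)) := by
      simp
    simp only [refLoop]
    rw [if_neg (by intro hcon; exact h1 hcon.2), if_neg h1]
  | succ m ih =>
    intro fuel res hfuel hm
    simp only [Nat.cast_add, Nat.cast_one]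
    match fuel, hfuel with
    | f + 1, hfuel =>
      rw [solveLoop.eq_def, hpk]
      simp only [Nat.cast_add, Nat.cast_one]
      have hlt : ((c.length : Int) - (m + 1) : Int) < (c.length : Int) := by
        have : (m : Int) + 1 ≤ (c.length : Int) := by exact_mod_cast hm
        omega
      by_cases hf : cnt c ((c.length : Int) - (m + 1)) - ((c.length : Int) - (m + 1)) ≤ 0
      · rw [if_neg (by intro hcon; omega), if_pos hlt]
        simp only [refLoop]
        rw [if_pos (by simpa using hf)]
      · rw [if_pos ⟨by omega, hlt⟩]
        have hstep : ((c.length : Int) - ((m : Int) + 1)) + 1 = (c.length : Int) - m := by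
          ring
        simp only [refLoop]
        rw [if_neg hf, hstep]
        exact ih f (PySem.Int.mod (res * (cnt c ((c.length : Int) - ((m : Int) + 1)) - ((c.length : Int) - ((m : Int) + 1)))) p)
          (by omega) (by omega)

theorem altAdvance_countP (s : List Int) (k : Int) (hs : s.Pairwise (· ≤ ·)) :
    ∀ (j : Nat), j ≤ s.countP (fun x => decide (x ≤ k)) →
      altAdvance s k j = s.countP (fun x => decide (x ≤ k)) := by
  have hmono : ∀ (i j : Nat) (hj : j < s.length) (hij : i ≤ j), s[i]'(by omega) ≤ s[j] := by
    intro i j hj hij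
    rcases Nat.lt_or_ge i j with h | h
    · exact (List.pairwise_iff_getElem.mp hs) i j (by omega) hj h
    · have : i = j := by omega
      subst this; exact le_refl _
  have key : ∀ (d j : Nat), s.length - j ≤ d → j ≤ s.countP (fun x => decide (x ≤ k)) →
      altAdvance s k j = s.countP (fun x => decide (x ≤ k)) := by
    intro d
    induction d with
    | zero =>
      intro j hd hj
      rw [altAdvance]
      rw [dif_neg (by omega)]
      have : s.countP (fun x => decide (x ≤ k)) ≤ s.length := List.countP_le_length
      omega
    | succ d ihd =>
      intro j hd hj
      rw [altAdvance]
      by_cases hjl : j < s.length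
      · rw [dif_pos hjl]
        by_cases hsj : s[j]'hjl ≤ k
        · rw [if_pos hsj]
          apply ihd (j + 1) (by omega)
          have h1 : s.countP (fun x => decide (x ≤ k))
              = (s.take (j + 1)).countP (fun x => decide (x ≤ k))
                + (s.drop (j + 1)).countP (fun x => decide (x ≤ k)) := by
            rw [← List.countP_append, List.take_append_drop]
          have h2 : (s.take (j + 1)).countP (fun x => decide (x ≤ k))
              = (s.take (j + 1)).length := by
            apply List.countP_eq_length.mpr
            intro a ha
            obtain ⟨i, hi, rfl⟩ := List.mem_iff_getElem.mp ha
            rw [List.getElem_take]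
            have : i ≤ j := by
              have := hi; simp [List.length_take] at this; omega
            simpa using le_trans (hmono i j hjl this) hsj
          have h3 : (s.take (j + 1)).length = j + 1 := by
            simp [List.length_take]; omega
          omega
        · rw [if_neg hsj]
          have h1 : s.countP (fun x => decide (x ≤ k))
              = (s.take j).countP (fun x => decide (x ≤ k))
                + (s.drop j).countP (fun x => decide (x ≤ k)) := by
            rw [← List.countP_append, List.take_append_drop]
          have h2 : (s.drop j).countP (fun x => decide (x ≤ k)) = 0 := by
            apply List.countP_eq_zero.mpr
            intro a ha
            obtain ⟨i, hi, rfl⟩ := List.mem_iff_getElem.mp ha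
            rw [List.getElem_drop]
            have hji : j + i < s.length := by
              have := hi; simp [List.length_drop] at this; omega
            have := hmono j (j + i) hji (by omega)
            simp
            omega
          have h3 : (s.take j).countP (fun x => decide (x ≤ k)) ≤ (s.take j).length :=
            List.countP_le_length
          have h4 : (s.take j).length ≤ j := by simp [List.length_take]
          omega
      · rw [dif_neg hjl]
        have : s.countP (fun x => decide (x ≤ k)) ≤ s.length := List.countP_le_length
        omega
  intro j hj
  exact key (s.length - j) j (le_refl _) hj

theorem altLoop_eq (c : List Int) (s : List Int) (p : Int)
    (hs : s.Pairwise (· ≤ ·)) (hcnt : ∀ q, cnt s q = cnt c q) :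
    ∀ (m : Nat) (j : Nat) (res : Int), m ≤ c.length →
      (j : Int) ≤ cnt s ((c.length : Int) - m) →
      altLoop s p (PySem.List.pyRange ((c.length : Int) - m) c.length 1) j res
        = refLoop c p m ((c.length : Int) - m) res := by
  intro m
  induction m with
  | zero =>
    intro j res _ _
    rw [PySem.List.pyRange_one_eq_nil (by omega)]
    simp [altLoop, refLoop]
  | succ m ih =>
    intro j res hm hj
    simp only [Nat.cast_add, Nat.cast_one] at hj ⊢
    have hlt : ((c.length : Int) - ((m : Int) + 1) : Int) < (c.length : Int) := by
      have : (m : Int) + 1 ≤ (c.length : Int) := by exact_mod_cast hm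
      omega
    rw [PySem.List.pyRange_one_cons hlt]
    have hjn : j ≤ s.countP (fun x => decide (x ≤ (c.length : Int) - ((m : Int) + 1))) := by
      have : cnt s ((c.length : Int) - ((m : Int) + 1)) = (s.countP (fun x => decide (x ≤ (c.length : Int) - ((m : Int) + 1))) : Int) := rfl
      omega
    simp only [altLoop]
    rw [altAdvance_countP s _ hs j hjn]
    have hcv : ((s.countP (fun x => decide (x ≤ (c.length : Int) - ((m : Int) + 1))) : Int))
        = cnt c ((c.length : Int) - ((m : Int) + 1)) := by
      rw [← hcnt]; rfl
    have hstep : ((c.length : Int) - ((m : Int) + 1)) + 1 = (c.length : Int) - m := by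
      ring
    simp only [refLoop, Nat.cast_add, Nat.cast_one]
    rw [hcv]
    by_cases hf : cnt c ((c.length : Int) - ((m : Int) + 1)) - ((c.length : Int) - ((m : Int) + 1)) ≤ 0
    · rw [if_pos hf, if_pos hf]
    · rw [if_neg hf, if_neg hf, hstep]
      apply ih
      · omega
      · rw [← hstep]
        have hmle : cnt s ((c.length : Int) - ((m : Int) + 1)) ≤ cnt s ((c.length : Int) - ((m : Int) + 1) + 1) := by
          have := List.countP_mono_left (l := s)
            (p := fun x => decide (x ≤ (c.length : Int) - ((m : Int) + 1)))
            (q := fun x => decide (x ≤ (c.length : Int) - ((m : Int) + 1) + 1))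
            (by intro a _ ha; simp at ha ⊢; omega)
          unfold cnt
          exact_mod_cast this
        have hcs : cnt s ((c.length : Int) - ((m : Int) + 1)) = cnt c ((c.length : Int) - ((m : Int) + 1)) := hcnt _
        have hcs2 : cnt s ((c.length : Int) - ((m : Int) + 1) + 1) = cnt c ((c.length : Int) - ((m : Int) + 1) + 1) := hcnt _
        rw [hcs, hcs2] at hmle
        rw [hcnt]
        omega

theorem solve_eq_ref (c : List Int) : solve c = refLoop c (10 ^ 9 + 7) c.length 0 1 := by
  simp only [solve]
  rw [fold_eq_counter]
  have := solveLoop_eq c (PySem.Dict.counter c)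
    (PySem.List.sorted (PySem.Dict.counter c).keys (fun x => x) false) (10 ^ 9 + 7)
    (pickable_eq c) c.length (c.length + 1) 1 (by omega) (le_refl _)
  simpa using this

theorem solve_alt_eq_ref (c : List Int) : solve_alt c = refLoop c (10 ^ 9 + 7) c.length 0 1 := by
  have h0 : solve_alt c = altLoop (PySem.List.sorted c (fun x => x) false) (10 ^ 9 + 7)
      (PySem.List.pyRange 0 c.length 1) 0 1 := rfl
  have hs : (PySem.List.sorted c (fun x => x) false).Pairwise (· ≤ ·) := by
    have := PySem.List.sorted_pairwise c (fun x => x)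
    simpa using this
  have hcnt : ∀ q, cnt (PySem.List.sorted c (fun x => x) false) q = cnt c q := by
    intro q
    unfold cnt
    exact_mod_cast congrArg Nat.cast ((PySem.List.sorted_perm c (fun x => x) false).countP_eq _)
  have := altLoop_eq c (PySem.List.sorted c (fun x => x) false) (10 ^ 9 + 7) hs hcnt
    c.length 0 1 (le_refl _) (by unfold cnt; positivity)
  rw [h0]
  simpa using this

-- ===== VERDICT (by name: the statement is the Claim_ definition above) =====
theorem solve_spec : Claim_equal_solve := by
  intro c _
  unfold Spec_solve
  rw [solve_eq_ref, solve_alt_eq_ref]
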